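-- pv_equiv track=rewrite | github.com/dav12id3/MethylCraft | helper.py | highlight_cpg
-- ===== SOURCE A (Python) =====
-- def highlight_cpg(seq):
--     """Highlight CpG dinucleotides in red bold font."""
--     highlighted = ''
--     i = 0
--     while i < len(seq) - 1:
--         if seq[i:i+2] == 'CG':
--             highlighted += '<span style="color:red;"><strong>CG</strong></span>'
--             i += 2
--         else:
--             highlighted += seq[i]
--             i += 1
--     if i < len(seq):
--         highlighted += seq[i]
--     return highlighted
-- ===== SOURCE B (Python) =====
-- def highlight_cpg(seq):
--     """Highlight CpG dinucleotides in red bold font."""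
--     return '<span style="color:red;"><strong>CG</strong></span>'.join(seq.split('CG'))
-- ===== Notes on version B (the rewrite author's own statement) =====
-- stated objective: idiomatic
-- what changed: Replaced the index-tracking char-by-char while loop building the output with repeated += by a single split on the CpG dinucleotide followed by a join with the highlight span.
import Mathlib
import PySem

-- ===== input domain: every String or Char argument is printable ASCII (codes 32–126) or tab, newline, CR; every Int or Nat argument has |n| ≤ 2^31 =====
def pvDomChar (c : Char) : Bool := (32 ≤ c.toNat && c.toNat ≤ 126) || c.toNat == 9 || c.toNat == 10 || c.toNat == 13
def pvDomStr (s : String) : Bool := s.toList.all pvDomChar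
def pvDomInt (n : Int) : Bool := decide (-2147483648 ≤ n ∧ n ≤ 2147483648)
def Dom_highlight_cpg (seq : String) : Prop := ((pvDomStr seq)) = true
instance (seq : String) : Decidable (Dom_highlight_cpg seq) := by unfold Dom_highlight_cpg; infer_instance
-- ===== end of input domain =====

-- B replaces A's index-tracking char-by-char copy loop by split-on-"CG" + join-with-the-span (idiomatic; same behaviour).

-- the highlight span both programs insert
def pvSpan : List Char := "<span style=\"color:red;\"><strong>CG</strong></span>".toList

-- ===== PORT A =====
-- A's while loop: at least two chars left ↔ i < len(seq) - 1; the trailing 'if i < len(seq)' is the one-char case.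
def pvLoopA : List Char → List Char → List Char
  | a :: b :: rest, acc =>
      if a = 'C' ∧ b = 'G' then pvLoopA rest (acc ++ pvSpan)
      else pvLoopA (b :: rest) (acc ++ [a])
  | [a], acc => acc ++ [a]
  | [], acc => acc

def highlight_cpg (seq : String) : String := String.ofList (pvLoopA seq.toList [])

-- ===== PORT B =====
-- Source B: span.join(seq.split('CG')); sep "CG" is nonempty, so split is PySem.Chars.splitOn
def highlight_cpg_alt (seq : String) : String :=
  String.ofList (PySem.Chars.join pvSpan (PySem.Chars.splitOn seq.toList ['C', 'G']))

-- ===== PRECONDITION & SPEC =====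
def Spec_highlight_cpg (seq : String) (out : String) : Prop := out = highlight_cpg_alt seq
instance (seq : String) (out : String) : Decidable (Spec_highlight_cpg seq out) := by unfold Spec_highlight_cpg; infer_instance

-- ===== CLAIM (what is proved, stated in full; the proofs are below) =====
def Claim_equal_highlight_cpg : Prop := ∀ (seq : String), Dom_highlight_cpg seq → Spec_highlight_cpg seq (highlight_cpg seq)

-- ===== LEMMAS AND PROOFS =====

theorem pvLoopA_acc_n : ∀ (n : Nat) (l : List Char), l.length ≤ n →
    ∀ acc, pvLoopA l acc = acc ++ pvLoopA l [] := by
  intro n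
  induction n with
  | zero =>
      intro l hl acc
      have : l = [] := by cases l <;> simp_all
      subst this; simp [pvLoopA]
  | succ n ih =>
      intro l hl acc
      match l with
      | [] => simp [pvLoopA]
      | [a] => simp [pvLoopA]
      | a :: b :: rest =>
          by_cases h : a = 'C' ∧ b = 'G'
          · simp only [pvLoopA, h, if_pos, and_self]
            rw [ih rest (by simp at hl ⊢; omega) (acc ++ pvSpan),
                ih rest (by simp at hl ⊢; omega) ([] ++ pvSpan)]
            simp
          · simp only [pvLoopA, if_neg h]
            rw [ih (b :: rest) (by simp at hl ⊢; omega) (acc ++ [a]),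
                ih (b :: rest) (by simp at hl ⊢; omega) ([] ++ [a])]
            simp

theorem pv_join_snoc (xs : List (List Char)) (y : List Char) :
    PySem.Chars.join pvSpan (xs ++ [y]) =
      PySem.Chars.join pvSpan xs ++ (if xs.isEmpty then [] else pvSpan) ++ y := by
  induction xs with
  | nil => simp [PySem.Chars.join, List.intercalate]
  | cons x xs ih =>
      cases xs with
      | nil => simp [PySem.Chars.join, List.intercalate]
      | cons z zs =>
          simp only [List.cons_append] at *
          rw [PySem.Chars.join_cons_cons, PySem.Chars.join_cons_cons, ih]
          simp

theorem pv_main : ∀ (fuel : Nat) (l cur : List Char) (acc : List (List Char)),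
    l.length ≤ fuel →
    PySem.Chars.join pvSpan (PySem.Chars.splitOn.go ['C','G'] fuel l cur acc) =
      PySem.Chars.join pvSpan acc.reverse ++ (if acc.isEmpty then [] else pvSpan) ++
        cur.reverse ++ pvLoopA l [] := by
  intro fuel
  induction fuel with
  | zero =>
      intro l cur acc hl
      have : l = [] := by cases l <;> simp_all
      subst this
      rw [PySem.Chars.splitOn.go]
      simp [pvLoopA, pv_join_snoc]
  | succ n ih =>
      intro l cur acc hl
      match l with
      | [] =>
          simp only [PySem.Chars.splitOn.go]
          simp [pvLoopA, pv_join_snoc]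
      | c :: rest =>
          rw [PySem.Chars.splitOn.go]
          by_cases hp : List.isPrefixOf ['C','G'] (c :: rest) = true
          · rw [if_pos hp]
            match rest, hp with
            | [], hp => simp [List.isPrefixOf] at hp
            | b :: rest2, hp =>
              have hc : c = 'C' ∧ b = 'G' := by
                simp [List.isPrefixOf] at hp; exact ⟨hp.1.symm, hp.2.symm⟩
              rw [ih _ _ _ (by simp at hl ⊢; omega)]
              rw [show (cur.reverse :: acc).reverse = acc.reverse ++ [cur.reverse] by simp]
              rw [pv_join_snoc]
              have hrest : List.drop (List.length ['C','G']) ('C' :: 'G' :: rest2) = rest2 := by simp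
              obtain ⟨hc1, hc2⟩ := hc; subst hc1; subst hc2
              rw [hrest]
              simp only [pvLoopA, and_self, if_pos]
              rw [pvLoopA_acc_n rest2.length rest2 le_rfl ([] ++ pvSpan)]
              simp
          · rw [if_neg hp]
            rw [ih _ _ _ (by simp at hl; omega)]
            have hstep : pvLoopA (c :: rest) [] = c :: pvLoopA rest [] := by
              match rest with
              | [] => simp [pvLoopA]
              | b :: rest2 =>
                  have hne : ¬ (c = 'C' ∧ b = 'G') := by
                    intro ⟨h1, h2⟩; subst h1; subst h2
                    simp [List.isPrefixOf] at hp
                  simp only [pvLoopA, if_neg hne]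
                  rw [pvLoopA_acc_n (b :: rest2).length _ le_rfl ([] ++ [c])]
                  simp
            rw [hstep]
            simp

-- ===== VERDICT (by name: the statement is the Claim_ definition above) =====
theorem highlight_cpg_spec : Claim_equal_highlight_cpg := by
  intro seq _
  unfold Spec_highlight_cpg highlight_cpg highlight_cpg_alt PySem.Chars.splitOn
  rw [pv_main (seq.toList.length + 1) seq.toList [] [] (by omega)]
  simp [PySem.Chars.join, List.intercalate]
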